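-- pv_equiv track=rewrite | github.com/amolinasimancas/data_science | python_21d/9_mayor_palindromo.py | find_largest_palindrome
-- ===== SOURCE A (Python) =====
-- def find_largest_palindrome(words):
--
--     def reverse_word(word):
--         return word[::-1]
--
--     palindrome_list = []
--     for word in words:
--         if word == reverse_word(word):
--             palindrome_list.append(word)
--
--     counter = 0
--     largest_palindrome = ""
--
--     if len(palindrome_list) == 0:
--         return None
--
--     else:
--         for palindrome in palindrome_list:
--             if len(palindrome) > counter:
--                 counter = len(palindrome)
--                 largest_palindrome = palindrome
--         return largest_palindrome
-- ===== SOURCE B (Python) =====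
-- def find_largest_palindrome(words):
--     best = None
--     for word in words:
--         if word == word[::-1] and (best is None or len(word) > len(best)):
--             best = word
--     return best
-- ===== Notes on version B (the rewrite author's own statement) =====
-- stated objective: simpler
-- what changed: Single pass keeping an Option best-so-far instead of building a palindrome list and then a separate max-finding pass; None falls out naturally.
import Mathlib
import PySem

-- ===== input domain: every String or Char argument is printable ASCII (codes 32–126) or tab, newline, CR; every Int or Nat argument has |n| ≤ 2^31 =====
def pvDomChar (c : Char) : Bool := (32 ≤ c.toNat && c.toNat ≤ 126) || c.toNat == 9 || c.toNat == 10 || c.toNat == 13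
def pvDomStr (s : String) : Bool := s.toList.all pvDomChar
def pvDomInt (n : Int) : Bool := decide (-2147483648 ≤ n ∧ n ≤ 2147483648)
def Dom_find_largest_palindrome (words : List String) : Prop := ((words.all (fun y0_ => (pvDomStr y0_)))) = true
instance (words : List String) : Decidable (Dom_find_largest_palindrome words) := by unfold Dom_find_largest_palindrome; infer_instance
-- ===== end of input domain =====

-- B replaces A's two passes (collect palindromes into a list, then scan it for the longest)
-- by one fold keeping an Option String best-so-far; proved equal on all inputs.


-- ===== PORT A =====
-- reverse_word(word) = word[::-1]; PySem.Str.slice? with step -1 is exact (never none for step ≠ 0)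
def reverse_word (word : String) : String := (PySem.Str.slice? word none none (-1)).getD ""

def find_largest_palindrome (words : List String) : Option String :=
  let palindrome_list : List String :=
    words.foldl (fun acc word => if word = reverse_word word then acc ++ [word] else acc) []
  if palindrome_list.length = 0 then
    none
  else
    let r : Int × String :=
      palindrome_list.foldl
        (fun s palindrome =>
          if PySem.Str.len palindrome > s.1 then (PySem.Str.len palindrome, palindrome) else s)
        (0, "")
    some r.2

-- ===== PORT B =====
-- one step of B's loop: 'if word == word[::-1] and (best is None or len(word) > len(best)): best = word'
def bStep (best : Option String) (word : String) : Option String :=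
  if word = (PySem.Str.slice? word none none (-1)).getD "" then
    match best with
    | none => some word
    | some b => if PySem.Str.len word > PySem.Str.len b then some word else best
  else best

def find_largest_palindrome_alt (words : List String) : Option String :=
  words.foldl bStep none

-- ===== PRECONDITION & SPEC =====
def Spec_find_largest_palindrome (words : List String) (out : Option String) : Prop := out = find_largest_palindrome_alt words
instance (words : List String) (out : Option String) : Decidable (Spec_find_largest_palindrome words out) := by unfold Spec_find_largest_palindrome; infer_instance

-- ===== CLAIM (what is proved, stated in full; the proofs are below) =====
def Claim_equal_find_largest_palindrome : Prop := ∀ (words : List String), Dom_find_largest_palindrome words → Spec_find_largest_palindrome words (find_largest_palindrome words)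

-- ===== LEMMAS AND PROOFS =====

-- A's first loop is a filter
lemma pal_list_eq_filter (words : List String) :
    words.foldl (fun acc word => if word = reverse_word word then acc ++ [word] else acc) []
      = words.filter (fun word => word = reverse_word word) := by
  simpa using PySem.List.foldl_append_if (p := fun word => decide (word = reverse_word word))
    (f := id) (l := words) (acc := [])

-- B's step ignores non-palindromes, so B's fold equals its fold over the filtered list
lemma bfold_eq_filter (words : List String) (s : Option String) :
    words.foldl bStep s
      = (words.filter (fun word => word = reverse_word word)).foldl bStep s := by
  induction words generalizing s with
  | nil => rfl
  | cons w ws ih =>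
    by_cases h : w = reverse_word w
    · have hd : decide (w = reverse_word w) = true := decide_eq_true h
      rw [List.filter_cons, if_pos hd]
      simp only [List.foldl_cons]
      exact ih _
    · have hd : ¬ (decide (w = reverse_word w) = true) := by simp [decide_eq_false h]
      have hb : bStep s w = s := if_neg h
      rw [List.filter_cons, if_neg hd]
      simp only [List.foldl_cons, hb]
      exact ih s

-- A's max-finding loop started at (len l, l) matches B's fold started at (some l),
-- over a list of palindromes
lemma max_fold_agree (pl : List String) (l : String)
    (hpl : ∀ w ∈ pl, w = reverse_word w) :
    pl.foldl bStep (some l)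
      = some ((pl.foldl
          (fun s p => if PySem.Str.len p > s.1 then (PySem.Str.len p, p) else s)
          (PySem.Str.len l, l)).2) := by
  induction pl generalizing l with
  | nil => rfl
  | cons p ps ih =>
    have hp : p = (PySem.Str.slice? p none none (-1)).getD "" := hpl p (by simp)
    have hps : ∀ w ∈ ps, w = reverse_word w := fun w hw => hpl w (by simp [hw])
    by_cases hlen : PySem.Str.len p > PySem.Str.len l
    · have hb : bStep (some l) p = some p := by
        rw [bStep, if_pos hp]; exact if_pos hlen
      have ha : (if PySem.Str.len p > (PySem.Str.len l, l).1
            then (PySem.Str.len p, p) else (PySem.Str.len l, l)) = (PySem.Str.len p, p) :=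
        if_pos hlen
      simp only [List.foldl_cons, hb]
      rw [ha]
      simp
      exact ih p hps
    · have hb : bStep (some l) p = some l := by
        rw [bStep, if_pos hp]; exact if_neg hlen
      have ha : (if PySem.Str.len p > (PySem.Str.len l, l).1
            then (PySem.Str.len p, p) else (PySem.Str.len l, l)) = (PySem.Str.len l, l) :=
        if_neg hlen
      simp only [List.foldl_cons, hb]
      rw [ha]
      simp
      exact ih l hps

-- a string of PySem length 0 is the empty string
lemma len_zero (s : String) (h : PySem.Str.len s = 0) : s = "" := by
  have hl : s.toList.length = 0 := by
    have := PySem.Str.len_eq s; omega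
  exact String.toList_eq_nil_iff.mp (List.length_eq_zero_iff.mp hl)

-- ===== VERDICT (by name: the statement is the Claim_ definition above) =====
theorem find_largest_palindrome_spec : Claim_equal_find_largest_palindrome := by
  intro words _
  unfold Spec_find_largest_palindrome find_largest_palindrome find_largest_palindrome_alt
  rw [pal_list_eq_filter, bfold_eq_filter]
  set pl := words.filter (fun word => word = reverse_word word) with hpl
  have hmem : ∀ w ∈ pl, w = reverse_word w := by
    intro w hw
    simpa using List.of_mem_filter hw
  cases hcase : pl with
  | nil => simp
  | cons p ps =>
    have hmem' : ∀ w ∈ p :: ps, w = reverse_word w := hcase ▸ hmem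
    have hp : p = (PySem.Str.slice? p none none (-1)).getD "" := hmem' p (by simp)
    have hps : ∀ w ∈ ps, w = reverse_word w := fun w hw => hmem' w (by simp [hw])
    have hstep : bStep none p = some p := by
      rw [bStep, if_pos hp]
    simp only [List.length_cons, List.foldl_cons, hstep, max_fold_agree ps p hps]
    by_cases h0 : PySem.Str.len p > (0 : Int)
    · have ha : (if PySem.Str.len p > ((0 : Int), "").1
            then (PySem.Str.len p, p) else ((0 : Int), "")) = (PySem.Str.len p, p) := if_pos h0
      rw [ha]
      simp
    · have hlen0 : PySem.Str.len p = 0 := by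
        have := PySem.Str.len_eq p; omega
      have hpe : p = "" := len_zero p hlen0
      have ha : (if PySem.Str.len p > ((0 : Int), "").1
            then (PySem.Str.len p, p) else ((0 : Int), "")) = ((0 : Int), "") := if_neg h0
      rw [ha, hpe]
      simp
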